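-- pv_equiv track=rewrite | github.com/yanfr0818/WmAgentScripts | src/python/Services/DBS/DBSReader.py | splitFilesAndLocationsInDBS
-- ===== SOURCE A (Python) =====
-- from typing import Callable, Optional, List, Tuple
--
-- def filterKeys(lst: list, data: dict, *otherData: dict) -> dict:
--     """
--     The function to filter dict data by a given list of keys to keep
--     :param lst: key values to keep
--     :param data/otherData: dicts
--     :return: filtered data (keep the input order if more than one dict is given)
--     """
--     filteredData = []
--     for d in [data] + list(otherData):
--         filteredData.append(
--             dict(
--                 (k, v)
--                 for k, v in d.items()
--                 if k in lst or (isinstance(k, tuple) and k[0] in lst)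
--             )
--         )
--     return tuple(filteredData) if len(filteredData) > 1 else filteredData[0]
--
-- def mapValues(f: Callable, data: dict) -> dict:
--     """
--     The function to map the values of a dict by a given function
--     :param f: the function to apply to values
--     :param data: dict
--     :return: dict of format {k: f(v)}
--     """
--     return dict((k, f(v)) for k, v in data.items())
--
-- def splitFilesAndLocationsInDBS(filesAndLocations: dict) -> Tuple[dict, dict]:
--     """
--     The function to split the files in a subset of files in DBS and of files not in DBS
--     :param filesAndLocations: dict of files and locations
--     :return: two dicts of files and locations
--     """
--     filesInDBS, filesNotInDBS = set(), set()
--     for filename in filesAndLocations: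
--         if any(
--             filename.startswith(strg) for strg in ["/store/unmerged/", "MCFakeFile-"]
--         ):
--             filesNotInDBS.add(filename)
--         else:
--             filesInDBS.add(filename)
--
--     inDBS = filterKeys(filesInDBS, filesAndLocations)
--     inDBS = mapValues(list, inDBS)
--
--     notInDBS = filterKeys(filesNotInDBS, filesAndLocations)
--     notInDBS = mapValues(list, notInDBS)
--
--     return inDBS, notInDBS
-- ===== SOURCE B (Python) =====
-- def splitFilesAndLocationsInDBS(filesAndLocations):
--     """Single fused pass: bucket each (filename, locations) pair directly
--     into inDBS / notInDBS instead of building key sets plus filterKeys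
--     re-scans plus mapValues passes."""
--     inDBS, notInDBS = {}, {}
--     for filename, locations in filesAndLocations.items():
--         if filename.startswith(("/store/unmerged/", "MCFakeFile-")):
--             notInDBS[filename] = list(locations)
--         else:
--             inDBS[filename] = list(locations)
--     return inDBS, notInDBS
-- ===== Notes on version B (the rewrite author's own statement) =====
-- stated objective: simpler
-- what changed: One fused pass over filesAndLocations.items() that buckets each (filename, locations) pair directly into inDBS/notInDBS, replacing A's two key sets plus two filterKeys re-scans plus two mapValues rebuild passes.
import Mathlib
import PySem

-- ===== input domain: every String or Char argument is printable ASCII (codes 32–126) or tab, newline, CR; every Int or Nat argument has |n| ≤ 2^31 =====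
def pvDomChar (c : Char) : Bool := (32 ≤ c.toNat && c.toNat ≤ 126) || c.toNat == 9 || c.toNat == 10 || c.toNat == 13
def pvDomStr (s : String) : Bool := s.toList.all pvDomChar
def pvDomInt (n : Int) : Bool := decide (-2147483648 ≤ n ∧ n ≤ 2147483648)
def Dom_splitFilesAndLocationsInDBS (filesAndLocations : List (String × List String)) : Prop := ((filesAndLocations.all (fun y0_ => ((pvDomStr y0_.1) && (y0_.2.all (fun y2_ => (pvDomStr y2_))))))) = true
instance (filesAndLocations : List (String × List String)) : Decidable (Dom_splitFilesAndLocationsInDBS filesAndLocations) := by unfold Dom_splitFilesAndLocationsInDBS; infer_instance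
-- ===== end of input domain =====

-- B replaces A's "two key sets + two filterKeys re-scans + two mapValues passes"
-- by one fused loop that buckets each (filename, locations) pair directly (simpler).

-- ===== PORT A =====
-- filterKeys(lst, data) with a single dict argument: dict((k, v) for k, v in data.items()
-- if k in lst or (isinstance(k, tuple) and k[0] in lst)); keys here are strings, so the
-- isinstance-tuple branch never fires (exact for String keys).
def pvFilterKeys (lst : PySem.Set String) (data : PySem.Dict String (List String)) : PySem.Dict String (List String) :=
  PySem.Dict.ofList (data.items.filter (fun kv => PySem.Set.contains lst kv.1))

-- mapValues(list, data): dict((k, list(v)) for k, v in data.items()); list(v) copies v.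
def pvMapValues (data : PySem.Dict String (List String)) : PySem.Dict String (List String) :=
  PySem.Dict.ofList (data.items.map (fun kv => (kv.1, kv.2)))

def splitFilesAndLocationsInDBS (filesAndLocations : List (String × List String)) : (List (String × List String)) × (List (String × List String)) :=
  -- for filename in filesAndLocations: add to filesNotInDBS / filesInDBS
  let sets := filesAndLocations.foldl
    (fun (st : PySem.Set String × PySem.Set String) kv =>
      if (["/store/unmerged/", "MCFakeFile-"] : List String).any (fun strg => PySem.Str.startswith kv.1 strg)
      then (st.1, PySem.Set.add st.2 kv.1)
      else (PySem.Set.add st.1 kv.1, st.2))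
    (PySem.Set.empty, PySem.Set.empty)
  let inDBS := pvMapValues (pvFilterKeys sets.1 (PySem.Dict.mk filesAndLocations))
  let notInDBS := pvMapValues (pvFilterKeys sets.2 (PySem.Dict.mk filesAndLocations))
  (inDBS.items, notInDBS.items)

-- ===== PORT B =====
def splitFilesAndLocationsInDBS_alt (filesAndLocations : List (String × List String)) : (List (String × List String)) × (List (String × List String)) :=
  -- inDBS, notInDBS = {}, {}; one pass assigning d[filename] = list(locations)
  let st := filesAndLocations.foldl
    (fun (st : PySem.Dict String (List String) × PySem.Dict String (List String)) kv =>
      if PySem.Str.startswith kv.1 "/store/unmerged/" || PySem.Str.startswith kv.1 "MCFakeFile-"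
      then (st.1, st.2.insert kv.1 kv.2)
      else (st.1.insert kv.1 kv.2, st.2))
    (PySem.Dict.empty, PySem.Dict.empty)
  (st.1.items, st.2.items)

-- ===== PRECONDITION & SPEC =====
def Spec_splitFilesAndLocationsInDBS (filesAndLocations : List (String × List String)) (out : (List (String × List String)) × (List (String × List String))) : Prop := out = splitFilesAndLocationsInDBS_alt filesAndLocations
instance (filesAndLocations : List (String × List String)) (out : (List (String × List String)) × (List (String × List String))) : Decidable (Spec_splitFilesAndLocationsInDBS filesAndLocations out) := by unfold Spec_splitFilesAndLocationsInDBS; infer_instance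

-- ===== CLAIM (what is proved, stated in full; the proofs are below) =====
def Claim_equal_splitFilesAndLocationsInDBS : Prop := ∀ (filesAndLocations : List (String × List String)), Dom_splitFilesAndLocationsInDBS filesAndLocations → Spec_splitFilesAndLocationsInDBS filesAndLocations (splitFilesAndLocationsInDBS filesAndLocations)

-- ===== LEMMAS AND PROOFS =====

-- the bucketing predicate both programs apply to a key
def pvP (k : String) : Bool :=
  PySem.Str.startswith k "/store/unmerged/" || PySem.Str.startswith k "MCFakeFile-"

lemma pvAny_eq (k : String) :
    (["/store/unmerged/", "MCFakeFile-"] : List String).any (fun strg => PySem.Str.startswith k strg) = pvP k := by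
  simp [pvP, List.any]

-- a two-way bucketing fold splits into two folds over the filtered lists
lemma pvPairFoldl {A B : Type} (u1 : A -> (String × List String) -> A) (u2 : B -> (String × List String) -> B)
    (fl : List (String × List String)) (a : A) (b : B) :
    fl.foldl (fun st kv => if pvP kv.1 then (st.1, u2 st.2 kv) else (u1 st.1 kv, st.2)) (a, b)
    = ((fl.filter (fun kv => !pvP kv.1)).foldl u1 a, (fl.filter (fun kv => pvP kv.1)).foldl u2 b) := by
  induction fl generalizing a b with
  | nil => rfl
  | cons kv rest ih =>
      simp only [List.foldl_cons, List.filter_cons]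
      cases h : pvP kv.1
      · simp [ih]
      · simp [ih]

-- A's set-building loop, componentwise
lemma pvSets_eq (fl : List (String × List String)) :
    fl.foldl
      (fun (st : PySem.Set String × PySem.Set String) kv =>
        if (["/store/unmerged/", "MCFakeFile-"] : List String).any (fun strg => PySem.Str.startswith kv.1 strg)
        then (st.1, PySem.Set.add st.2 kv.1)
        else (PySem.Set.add st.1 kv.1, st.2)) (PySem.Set.empty, PySem.Set.empty)
    = ((fl.filter (fun kv => !pvP kv.1)).foldl (fun s kv => PySem.Set.add s kv.1) PySem.Set.empty,
       (fl.filter (fun kv => pvP kv.1)).foldl (fun s kv => PySem.Set.add s kv.1) PySem.Set.empty) := by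
  have hfun : (fun (st : PySem.Set String × PySem.Set String) (kv : String × List String) =>
      if (["/store/unmerged/", "MCFakeFile-"] : List String).any (fun strg => PySem.Str.startswith kv.1 strg)
      then (st.1, PySem.Set.add st.2 kv.1)
      else (PySem.Set.add st.1 kv.1, st.2))
      = (fun st kv => if pvP kv.1 then (st.1, PySem.Set.add st.2 kv.1) else (PySem.Set.add st.1 kv.1, st.2)) := by
    funext st kv; rw [pvAny_eq]
  rw [hfun]
  exact pvPairFoldl (fun s kv => PySem.Set.add s kv.1) (fun s kv => PySem.Set.add s kv.1) fl _ _

-- B's bucketing loop, componentwise (B's condition IS pvP by definition)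
lemma pvAlt_eq (fl : List (String × List String)) :
    fl.foldl
      (fun (st : PySem.Dict String (List String) × PySem.Dict String (List String)) kv =>
        if PySem.Str.startswith kv.1 "/store/unmerged/" || PySem.Str.startswith kv.1 "MCFakeFile-"
        then (st.1, st.2.insert kv.1 kv.2)
        else (st.1.insert kv.1 kv.2, st.2)) (PySem.Dict.empty, PySem.Dict.empty)
    = ((fl.filter (fun kv => !pvP kv.1)).foldl (fun d kv => d.insert kv.1 kv.2) PySem.Dict.empty,
       (fl.filter (fun kv => pvP kv.1)).foldl (fun d kv => d.insert kv.1 kv.2) PySem.Dict.empty) := by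
  exact pvPairFoldl (fun (d : PySem.Dict String (List String)) kv => d.insert kv.1 kv.2)
    (fun (d : PySem.Dict String (List String)) kv => d.insert kv.1 kv.2) fl _ _

-- membership in the set a bucket loop builds, for a pair drawn from the same list
lemma pvContains_filter (fl : List (String × List String)) (q : Bool → Bool) (kv : String × List String)
    (hmem : kv ∈ fl) :
    PySem.Set.contains ((fl.filter (fun kv => q (pvP kv.1))).foldl (fun s kv => PySem.Set.add s kv.1) PySem.Set.empty) kv.1
      = q (pvP kv.1) := by
  have h := PySem.Set.mem_foldl_add (fl.filter (fun kv => q (pvP kv.1))) (fun kv => kv.1) PySem.Set.empty kv.1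
  rcases hq : q (pvP kv.1) with _ | _
  · rw [Bool.eq_false_iff]
    intro hc
    rw [PySem.Set.contains_iff] at hc
    rcases h.mp hc with hin | ⟨b, hb, hk⟩
    · simp [PySem.Set.empty] at hin
    · have := List.of_mem_filter hb
      rw [hk] at hq
      simp [hq] at this
  · rw [PySem.Set.contains_iff]
    exact h.mpr (Or.inr ⟨kv, List.mem_filter.mpr ⟨hmem, by simp [hq]⟩, rfl⟩)

-- a dict built by inserting a nodup-keyed pair list into empty has exactly that items list
lemma pvItems_ofNodup (l : List (String × List String)) (hnd : (l.map Prod.fst).Nodup) :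
    (l.foldl (fun d kv => d.insert kv.1 kv.2) (PySem.Dict.empty : PySem.Dict String (List String))).items = l := by
  have h := PySem.Dict.items_foldl_insert_fresh l Prod.fst Prod.snd (PySem.Dict.empty : PySem.Dict String (List String))
    (fun a _ => by simp [PySem.Dict.contains_empty]) hnd
  simpa [PySem.Dict.empty] using h

-- mapValues(list, ·) is the identity on a dict with nodup keys, at the items level
lemma pvMapValues_items (d : PySem.Dict String (List String)) (hnd : d.keys.Nodup) :
    (pvMapValues d).items = d.items := by
  unfold pvMapValues
  have hnd' : (d.items.map (fun kv => (kv.1, kv.2)) |>.map Prod.fst).Nodup := by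
    simpa [List.map_map, Function.comp, PySem.Dict.keys] using hnd
  have := pvItems_ofNodup (d.items.map (fun kv => (kv.1, kv.2))) hnd'
  simpa [PySem.Dict.ofList, PySem.Dict.update, PySem.Dict.empty] using this

-- one bucket of A equals the corresponding foldl-insert over the filtered list
lemma pvBucket (fl : List (String × List String)) (q : Bool → Bool) :
    (pvMapValues (pvFilterKeys
        ((fl.filter (fun kv => q (pvP kv.1))).foldl (fun s kv => PySem.Set.add s kv.1) PySem.Set.empty)
        (PySem.Dict.mk fl))).items
    = ((fl.filter (fun kv => q (pvP kv.1))).foldl (fun d kv => d.insert kv.1 kv.2)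
        (PySem.Dict.empty : PySem.Dict String (List String))).items := by
  unfold pvFilterKeys
  have hfil : (PySem.Dict.mk fl).items.filter
      (fun kv => PySem.Set.contains ((fl.filter (fun kv => q (pvP kv.1))).foldl (fun s kv => PySem.Set.add s kv.1) PySem.Set.empty) kv.1)
      = fl.filter (fun kv => q (pvP kv.1)) := by
    show fl.filter _ = _
    exact List.filter_congr (fun kv hmem => pvContains_filter fl q kv hmem)
  rw [hfil]
  have hnd : (PySem.Dict.ofList (fl.filter (fun kv => q (pvP kv.1)))).keys.Nodup :=
    PySem.Dict.nodup_keys_ofList _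
  rw [pvMapValues_items _ hnd]
  rfl

-- ===== VERDICT (by name: the statement is the Claim_ definition above) =====
theorem splitFilesAndLocationsInDBS_spec : Claim_equal_splitFilesAndLocationsInDBS := by
  intro fl _
  show splitFilesAndLocationsInDBS fl = splitFilesAndLocationsInDBS_alt fl
  unfold splitFilesAndLocationsInDBS splitFilesAndLocationsInDBS_alt
  rw [pvSets_eq, pvAlt_eq]
  refine Prod.ext ?_ ?_
  · simpa using pvBucket fl (fun b => !b)
  · simpa using pvBucket fl (fun b => b)
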